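-- pv_equiv track=rewrite | github.com/XIAOMANSDK/B6x | xm_b6_mcp/src/modules/module_b/ble_error_tools.py | _generate_api_checklist
-- ===== SOURCE A (Python) =====
-- from typing import Dict, List, Optional
--
-- def _generate_api_checklist(related_apis: List[Dict]) -> List[str]:
--     """
--     Generate an API-level troubleshooting checklist.
--
--     Args:
--         related_apis: List of related API information
--
--     Returns:
--         List of checklist items for API investigation
--     """
--     checklist = []
--
--     if not related_apis:
--         return checklist
--
--     # Sort by probability (high first)
--     prob_order = {"high": 0, "medium": 1, "low": 2}
--     sorted_apis = sorted(
--         related_apis,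
--         key=lambda x: prob_order.get(x.get("probability", "medium"), 1)
--     )
--
--     for api in sorted_apis:
--         api_name = api.get("name", "unknown_api")
--         condition = api.get("condition", "")
--         probability = api.get("probability", "medium")
--
--         # Format checklist item
--         checklist_item = f"[ ] Check {api_name}()"
--
--         if condition:
--             checklist_item += f": {condition}"
--
--         checklist.append(checklist_item)
--
--     return checklist
-- ===== SOURCE B (Python) =====
-- from typing import Dict, List
--
--
-- def _generate_api_checklist(related_apis: List[Dict]) -> List[str]:
--     """Bucket the APIs by probability in one pass (stable bucket sort), then format."""
--     if not related_apis:
--         return []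
--
--     high, medium, low = [], [], []
--     for api in related_apis:
--         p = api.get("probability", "medium")
--         if p == "high":
--             high.append(api)
--         elif p == "low":
--             low.append(api)
--         else:
--             medium.append(api)
--
--     checklist = []
--     for api in high + medium + low:
--         item = "[ ] Check {}()".format(api.get("name", "unknown_api"))
--         condition = api.get("condition", "")
--         if condition:
--             item += ": " + condition
--         checklist.append(item)
--     return checklist
-- ===== Notes on version B (the rewrite author's own statement) =====
-- stated objective: alternative
-- what changed: Replaces the comparison sort keyed by a probability-rank dict with a single-pass stable three-bucket (counting) sort into high/medium/low lists, then formats the concatenated buckets.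
import Mathlib
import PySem

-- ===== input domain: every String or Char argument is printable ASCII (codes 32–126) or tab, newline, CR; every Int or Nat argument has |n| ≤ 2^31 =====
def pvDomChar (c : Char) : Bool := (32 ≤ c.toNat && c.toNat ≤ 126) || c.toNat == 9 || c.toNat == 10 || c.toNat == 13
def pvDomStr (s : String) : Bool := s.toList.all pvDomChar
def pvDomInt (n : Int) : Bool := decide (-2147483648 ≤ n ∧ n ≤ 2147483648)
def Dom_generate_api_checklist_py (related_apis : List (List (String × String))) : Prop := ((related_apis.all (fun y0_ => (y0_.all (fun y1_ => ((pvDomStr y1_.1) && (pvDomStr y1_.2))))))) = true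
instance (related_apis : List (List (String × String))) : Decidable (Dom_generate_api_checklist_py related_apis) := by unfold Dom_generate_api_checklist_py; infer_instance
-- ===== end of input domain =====

-- B replaces A's dict-keyed comparison sort with a one-pass stable three-bucket split (alternative decomposition; same output).

-- shared dict-access primitive: Python api.get(k, dflt) on an association list (first match)
def apiGet (api : List (String × String)) (k dflt : String) : String :=
  match api with
  | [] => dflt
  | (a, b) :: t => if a = k then b else apiGet t k dflt

-- ===== PORT A =====
def generate_api_checklist_py (related_apis : List (List (String × String))) : List String :=
  if related_apis = [] then []
  else
    let prob_order : PySem.Dict String Int :=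
      PySem.Dict.ofList [("high", 0), ("medium", 1), ("low", 2)]
    let sorted_apis :=
      PySem.List.sorted related_apis
        (fun x => prob_order.getD (apiGet x "probability" "medium") 1) false
    sorted_apis.foldl
      (fun checklist api =>
        let api_name := apiGet api "name" "unknown_api"
        let condition := apiGet api "condition" ""
        let checklist_item := "[ ] Check " ++ api_name ++ "()"
        let checklist_item := if condition ≠ "" then checklist_item ++ ": " ++ condition else checklist_item
        checklist ++ [checklist_item]) []

-- ===== PORT B =====
def generate_api_checklist_py_alt (related_apis : List (List (String × String))) : List String :=
  if related_apis = [] then []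
  else
    let buckets :=
      related_apis.foldl
        (fun (acc : List (List (String × String)) × List (List (String × String)) × List (List (String × String))) api =>
          let p := apiGet api "probability" "medium"
          if p = "high" then (acc.1 ++ [api], acc.2.1, acc.2.2)
          else if p = "low" then (acc.1, acc.2.1, acc.2.2 ++ [api])
          else (acc.1, acc.2.1 ++ [api], acc.2.2))
        ([], [], [])
    (buckets.1 ++ buckets.2.1 ++ buckets.2.2).foldl
      (fun checklist api =>
        let item := "[ ] Check " ++ apiGet api "name" "unknown_api" ++ "()"
        let condition := apiGet api "condition" ""
        let item := if condition ≠ "" then item ++ ": " ++ condition else item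
        checklist ++ [item]) []

-- ===== PRECONDITION & SPEC =====
def Spec_generate_api_checklist_py (related_apis : List (List (String × String))) (out : List String) : Prop := out = generate_api_checklist_py_alt related_apis
instance (related_apis : List (List (String × String))) (out : List String) : Decidable (Spec_generate_api_checklist_py related_apis out) := by unfold Spec_generate_api_checklist_py; infer_instance

-- ===== CLAIM (what is proved, stated in full; the proofs are below) =====
def Claim_equal_generate_api_checklist_py : Prop := ∀ (related_apis : List (List (String × String))), Dom_generate_api_checklist_py related_apis → Spec_generate_api_checklist_py related_apis (generate_api_checklist_py related_apis)

-- ===== LEMMAS AND PROOFS =====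

-- A's sort key, written out
def pvKey (api : List (String × String)) : Int :=
  (PySem.Dict.ofList [("high", (0 : Int)), ("medium", 1), ("low", 2)]).getD
    (apiGet api "probability" "medium") 1

theorem pvKey_eq (api : List (String × String)) :
    pvKey api =
      (if apiGet api "probability" "medium" = "high" then 0
       else if apiGet api "probability" "medium" = "low" then 2 else 1) := by
  unfold pvKey
  have hd : (PySem.Dict.ofList [("high",(0:Int)),("medium",1),("low",2)])
      = PySem.Dict.mk [("high",0),("medium",1),("low",2)] := rfl
  rw [hd]
  simp only [PySem.Dict.getD]
  rw [PySem.Dict.get?_mk_cons, PySem.Dict.get?_mk_cons, PySem.Dict.get?_mk_cons]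
  have hnil : ∀ x : String, (PySem.Dict.mk ([] : List (String × Int))).get? x = none := by
    intro x; rfl
  rw [hnil]
  simp only [beq_iff_eq]
  generalize apiGet api "probability" "medium" = p
  by_cases h1 : "high" = p
  · simp [h1]
  · by_cases h2 : "medium" = p
    · subst h2; simp
    · by_cases h3 : "low" = p
      · subst h3; simp
      · simp [h1, h2, h3, Ne.symm h1, Ne.symm h3]

theorem insertBy_append_left {α : Type} (before : α → α → Bool) (x : α) (ys zs : List α)
    (h : ∀ y ∈ ys, before x y = false) :
    PySem.List.insertBy before x (ys ++ zs) = ys ++ PySem.List.insertBy before x zs := by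
  induction ys with
  | nil => simp
  | cons y ys ih =>
    have hy : before x y = false := h y (by simp)
    have hstep : PySem.List.insertBy before x ((y :: ys) ++ zs)
        = if before x y then x :: ((y :: ys) ++ zs) else y :: PySem.List.insertBy before x (ys ++ zs) := rfl
    rw [hstep, hy, ih (fun a ha => h a (by simp [ha]))]
    simp

theorem insertBy_all_before {α : Type} (before : α → α → Bool) (x : α) (zs : List α)
    (h : ∀ z ∈ zs, before x z = true) :
    PySem.List.insertBy before x zs = x :: zs := by
  cases zs with
  | nil => rfl
  | cons z zs =>
    have hz : before x z = true := h z (by simp)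
    show (if before x z then x :: z :: zs else z :: PySem.List.insertBy before x zs) = _
    simp [hz]

theorem pvKey_mem (api : List (String × String)) :
    pvKey api = 0 ∨ pvKey api = 1 ∨ pvKey api = 2 := by
  rw [pvKey_eq]; split_ifs <;> simp

theorem bucket_sort_aux {α : Type} (key : α → Int) :
    ∀ (xs A B C : List α), (∀ a ∈ A, key a = 0) → (∀ b ∈ B, key b = 1) → (∀ c ∈ C, key c = 2) →
      (∀ x ∈ xs, key x = 0 ∨ key x = 1 ∨ key x = 2) →
      xs.foldl (fun acc x => PySem.List.insertBy (fun a b => decide (key a < key b)) x acc) (A ++ B ++ C)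
        = (A ++ xs.filter (fun x => decide (key x = 0)))
            ++ (B ++ xs.filter (fun x => decide (key x = 1)))
            ++ (C ++ xs.filter (fun x => decide (key x = 2))) := by
  intro xs
  induction xs with
  | nil => intro A B C _ _ _ _; simp
  | cons x xs ih =>
    intro A B C hA hB hC hx
    have hmemBC : ∀ z ∈ B ++ C, key z = 1 ∨ key z = 2 := by
      intro z hz; rcases List.mem_append.1 hz with h | h
      · exact Or.inl (hB z h)
      · exact Or.inr (hC z h)
    rcases hx x (by simp) with h0 | h1 | h2
    · -- key x = 0: goes to end of A
      have step : PySem.List.insertBy (fun a b => decide (key a < key b)) x (A ++ B ++ C)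
          = (A ++ [x]) ++ B ++ C := by
        rw [List.append_assoc, insertBy_append_left _ _ _ _
              (fun y hy => by simp [hA y hy, h0]),
            insertBy_all_before _ _ _
              (fun z hz => by rcases hmemBC z hz with h | h <;> simp [h, h0])]
        simp
      rw [List.foldl_cons, step,
          ih (A ++ [x]) B C
            (by intro a ha; rcases List.mem_append.1 ha with h | h
                · exact hA a h
                · simp at h; subst h; exact h0)
            hB hC (fun y hy => hx y (by simp [hy]))]
      simp [h0, ]
    · -- key x = 1: goes to end of B
      have step : PySem.List.insertBy (fun a b => decide (key a < key b)) x (A ++ B ++ C)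
          = A ++ (B ++ [x]) ++ C := by
        rw [List.append_assoc, insertBy_append_left _ _ _ _
              (fun y hy => by simp [hA y hy, h1]),
            insertBy_append_left _ _ _ _
              (fun y hy => by simp [hB y hy, h1]),
            insertBy_all_before _ _ _
              (fun z hz => by simp [hC z hz, h1])]
        simp
      rw [List.foldl_cons, step,
          ih A (B ++ [x]) C hA
            (by intro b hb; rcases List.mem_append.1 hb with h | h
                · exact hB b h
                · simp at h; subst h; exact h1)
            hC (fun y hy => hx y (by simp [hy]))]
      simp [h1, ]
    · -- key x = 2: goes to the very end
      have step : PySem.List.insertBy (fun a b => decide (key a < key b)) x (A ++ B ++ C)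
          = A ++ B ++ (C ++ [x]) := by
        rw [PySem.List.insertBy_of_forall_not_before]
        · simp
        · intro y hy
          rcases List.mem_append.1 hy with h | h
          · rcases List.mem_append.1 h with h' | h'
            · simp [hA y h', h2]
            · simp [hB y h', h2]
          · simp [hC y h, h2]
      rw [List.foldl_cons, step,
          ih A B (C ++ [x]) hA hB
            (by intro c hc; rcases List.mem_append.1 hc with h | h
                · exact hC c h
                · simp at h; subst h; exact h2)
            (fun y hy => hx y (by simp [hy]))]
      simp [h2, ]

theorem sorted3_eq_filters (xs : List (List (String × String)))
    : PySem.List.sorted xs pvKey false =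
      xs.filter (fun x => decide (pvKey x = 0)) ++ xs.filter (fun x => decide (pvKey x = 1))
        ++ xs.filter (fun x => decide (pvKey x = 2)) := by
  have h := bucket_sort_aux pvKey xs [] [] []
    (by simp) (by simp) (by simp) (fun x _ => pvKey_mem x)
  simpa [PySem.List.sorted] using h

def pvFmt (api : List (String × String)) : String :=
  let name := apiGet api "name" "unknown_api"
  let cond := apiGet api "condition" ""
  let item := "[ ] Check " ++ name ++ "()"
  if cond ≠ "" then item ++ ": " ++ cond else item

theorem foldl_fmt (xs : List (List (String × String))) (init : List String) :
    xs.foldl (fun acc api => acc ++ [pvFmt api]) init = init ++ xs.map pvFmt := by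
  induction xs generalizing init with
  | nil => simp
  | cons x xs ih => simp [ih]

theorem bucketB_aux :
    ∀ (xs A B C : List (List (String × String))),
      xs.foldl
        (fun (acc : List (List (String × String)) × List (List (String × String)) × List (List (String × String))) api =>
          let p := apiGet api "probability" "medium"
          if p = "high" then (acc.1 ++ [api], acc.2.1, acc.2.2)
          else if p = "low" then (acc.1, acc.2.1, acc.2.2 ++ [api])
          else (acc.1, acc.2.1 ++ [api], acc.2.2)) (A, B, C)
      = (A ++ xs.filter (fun x => decide (apiGet x "probability" "medium" = "high")),
         B ++ xs.filter (fun x => decide (¬ apiGet x "probability" "medium" = "high" ∧ ¬ apiGet x "probability" "medium" = "low")),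
         C ++ xs.filter (fun x => decide (apiGet x "probability" "medium" = "low"))) := by
  intro xs
  induction xs with
  | nil => intro A B C; simp
  | cons x xs ih =>
    intro A B C
    by_cases h1 : apiGet x "probability" "medium" = "high"
    · simp only [List.foldl_cons, h1, ih]
      simp [h1]
    · by_cases h2 : apiGet x "probability" "medium" = "low"
      · simp only [List.foldl_cons, ih, h2]
        simp [h2]
      · simp only [List.foldl_cons, ih, if_neg h1, if_neg h2]
        simp [h1, h2]

theorem filters_match (xs : List (List (String × String))) :
    xs.filter (fun x => decide (pvKey x = 0)) = xs.filter (fun x => decide (apiGet x "probability" "medium" = "high"))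
    ∧ xs.filter (fun x => decide (pvKey x = 1)) = xs.filter (fun x => decide (¬ apiGet x "probability" "medium" = "high" ∧ ¬ apiGet x "probability" "medium" = "low"))
    ∧ xs.filter (fun x => decide (pvKey x = 2)) = xs.filter (fun x => decide (apiGet x "probability" "medium" = "low")) := by
  refine ⟨List.filter_congr ?_, List.filter_congr ?_, List.filter_congr ?_⟩ <;>
    (intro x _; rw [pvKey_eq x]; split_ifs <;> simp_all)

theorem main_eq (ras : List (List (String × String))) :
    generate_api_checklist_py ras = generate_api_checklist_py_alt ras := by
  by_cases h : ras = []
  · simp [generate_api_checklist_py, generate_api_checklist_py_alt, h]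
  · have hA : generate_api_checklist_py ras = (PySem.List.sorted ras pvKey false).map pvFmt := by
      unfold generate_api_checklist_py
      rw [if_neg h]
      exact (foldl_fmt (PySem.List.sorted ras pvKey false) []).trans (List.nil_append _)
    have hB : generate_api_checklist_py_alt ras =
        (ras.filter (fun x => decide (apiGet x "probability" "medium" = "high"))
          ++ ras.filter (fun x => decide (¬ apiGet x "probability" "medium" = "high" ∧ ¬ apiGet x "probability" "medium" = "low"))
          ++ ras.filter (fun x => decide (apiGet x "probability" "medium" = "low"))).map pvFmt := by
      unfold generate_api_checklist_py_alt
      rw [if_neg h]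
      show (((ras.foldl _ ([], [], [])).1 ++ _ ++ _).foldl _ []) = _
      rw [bucketB_aux ras [] [] []]
      exact (foldl_fmt _ []).trans (by simp)
    obtain ⟨f0, f1, f2⟩ := filters_match ras
    rw [hA, hB, sorted3_eq_filters, f0, f1, f2]

-- ===== VERDICT (by name: the statement is the Claim_ definition above) =====
theorem generate_api_checklist_py_spec : Claim_equal_generate_api_checklist_py := by
  intro related_apis _
  exact main_eq related_apis
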